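-- pv_equiv track=rewrite | github.com/sanial2001/searchin-and-sorting | Permute to Make List Larger.py | solve
-- ===== SOURCE A (Python) =====
-- def solve(a, b):
--     n = len(a)
--     a.sort(reverse=True)
--     b.sort(reverse=True)
--
--     i, j = 0, 0
--     ans = 0
--     while i < n and j < n:
--         while j < n and b[j] >= a[i]:
--             j += 1
--         if j == n:
--             break
--         ans += 1
--         i, j = i + 1, j + 1
--
--     return ans
-- ===== SOURCE B (Python) =====
-- def solve(a, b):
--     # Matches A's in-place mutation: both lists end up sorted descending.
--     a.sort(reverse=True)
--     b.sort(reverse=True)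
--     # Only the len(a) largest elements of b are ever considered; take them
--     # ascending, and walk a's values ascending too.  `ans` doubles as the
--     # pointer to the smallest still-unbeaten candidate.
--     ys = b[:len(a)][::-1]
--     ans = 0
--     for x in reversed(a):
--         if ans < len(ys) and x > ys[ans]:
--             ans += 1
--     return ans
-- ===== Notes on version B (the rewrite author's own statement) =====
-- stated objective: alternative
-- what changed: Replaced A's nested skip-then-match while loops over descending values (front pointers, inner scan past unbeatable b's) by the mirror greedy that walks a's values ascending over the top-len(a) candidates of b taken ascending, where the running answer itself is the match pointer, so the inner skip loop disappears.
import Mathlib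
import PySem

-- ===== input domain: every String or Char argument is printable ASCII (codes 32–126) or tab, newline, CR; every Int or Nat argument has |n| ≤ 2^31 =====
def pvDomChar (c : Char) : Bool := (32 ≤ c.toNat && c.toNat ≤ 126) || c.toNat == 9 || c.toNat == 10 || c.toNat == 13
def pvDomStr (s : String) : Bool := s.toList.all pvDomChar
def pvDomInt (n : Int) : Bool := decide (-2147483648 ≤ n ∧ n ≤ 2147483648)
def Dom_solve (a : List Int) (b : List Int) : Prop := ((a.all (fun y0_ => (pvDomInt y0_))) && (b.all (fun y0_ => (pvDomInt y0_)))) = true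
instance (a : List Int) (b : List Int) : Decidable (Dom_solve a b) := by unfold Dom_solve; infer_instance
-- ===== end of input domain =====

-- Port A vs B: A's nested skip/match while-loops over descending lists vs the mirror
-- ascending greedy where the answer is the match pointer ("alternative" objective).
-- Both Pythons sort `a` and `b` in place (descending); the equivalence proved here is
-- about the RETURN value (B performs the same mutation).


-- ===== PORT A =====
-- inner `while j < n and b[j] >= a[i]: j += 1` (b[j] in range under Pre_, so getD is exact)
def skipA (aS bS : List Int) (n i j : Nat) : Nat :=
  if h : j < n ∧ bS.getD j 0 ≥ aS.getD i 0 then skipA aS bS n i (j + 1) else j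
termination_by n - j
decreasing_by omega

-- outer `while i < n and j < n: …`
def loopA (aS bS : List Int) (n i j : Nat) (ans : Int) : Int :=
  if h : i < n ∧ j < n then
    let j' := skipA aS bS n i j
    if j' = n then ans
    else loopA aS bS n (i + 1) (j' + 1) (ans + 1)
  else ans
termination_by n - i
decreasing_by omega

def solve (a : List Int) (b : List Int) : Int :=
  let n := a.length
  let aS := PySem.List.sorted a (fun x => x) true
  let bS := PySem.List.sorted b (fun x => x) true
  loopA aS bS n 0 0 0

-- ===== PORT B =====
def solve_alt (a : List Int) (b : List Int) : Int :=
  let aS := PySem.List.sorted a (fun x => x) true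
  let bS := PySem.List.sorted b (fun x => x) true
  -- ys = b[:len(a)][::-1]   ([::-1] is reverse: PySem.List.slice?_none_none_neg_one)
  let ys := (PySem.List.slice bS none (some (a.length : Int))).reverse
  -- for x in reversed(a): if ans < len(ys) and x > ys[ans]: ans += 1
  aS.reverse.foldl
    (fun ans x => if ans < (ys.length : Int) ∧ x > PySem.List.pyGetD ys ans 0 then ans + 1 else ans) 0

-- ===== PRECONDITION & SPEC =====
-- Pre_ excludes exactly the inputs where A raises IndexError: when len(b) < len(a)
-- (and a is nonempty) A always reads b[j] past b's end; B returns a value there.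
def Pre_solve (a : List Int) (b : List Int) : Prop := a.length ≤ b.length
instance (a : List Int) (b : List Int) : Decidable (Pre_solve a b) := by unfold Pre_solve; infer_instance
def pvWitness_solve : List Int × List Int := ([3, 1, 2], [2, 0, 5, 2])

def Spec_solve (a : List Int) (b : List Int) (out : Int) : Prop := out = solve_alt a b
instance (a : List Int) (b : List Int) (out : Int) : Decidable (Spec_solve a b out) := by unfold Spec_solve; infer_instance

-- ===== CLAIM (what is proved, stated in full; the proofs are below) =====
def Claim_equal_solve : Prop := ∀ (a : List Int) (b : List Int), Dom_solve a b → Pre_solve a b → Spec_solve a b (solve a b)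

-- ===== LEMMAS AND PROOFS =====

-- `matchD d e k`: the k front (largest) elements of the descending list d beat, in order,
-- the k back (smallest) elements of the descending list e.
def matchD (d e : List Int) (k : Nat) : Bool :=
  decide (k ≤ d.length) && decide (k ≤ e.length) &&
    (List.range k).all (fun i => decide (e.getD (e.length - k + i) 0 < d.getD i 0))

def bestD (d e : List Int) : Nat := Nat.findGreatest (fun k => matchD d e k = true) d.length

-- ascending mirror
def matchA (X Y : List Int) (k : Nat) : Bool :=
  decide (k ≤ X.length) && decide (k ≤ Y.length) &&
    (List.range k).all (fun i => decide (Y.getD i 0 < X.getD (X.length - k + i) 0))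

def bestA (X Y : List Int) : Nat := Nat.findGreatest (fun k => matchA X Y k = true) X.length

-- B's greedy as a structural recursion on ascending lists
def gB : List Int → List Int → Int
  | [], _ => 0
  | _ :: _, [] => 0
  | x :: X, y :: Y => if x > y then 1 + gB X Y else gB X (y :: Y)

-- getD bookkeeping helpers (getD with default 0, so index rewrites are plain rewrites)
lemma gd_drop (l : List Int) (i j : Nat) : (l.drop i).getD j 0 = l.getD (i + j) 0 := by
  by_cases h : i + j < l.length
  · rw [List.getD_eq_getElem _ _ (by simp; omega), List.getD_eq_getElem _ _ h]; simp
  · rw [List.getD_eq_default _ _ (by simp; omega), List.getD_eq_default _ _ (by omega)]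

lemma gd_rev (l : List Int) (i : Nat) (h : i < l.length) :
    l.reverse.getD i 0 = l.getD (l.length - 1 - i) 0 := by
  rw [List.getD_eq_getElem _ _ (by simpa), List.getD_eq_getElem _ _ (by omega)]
  exact List.getElem_reverse _

lemma gd_mem (l : List Int) (i : Nat) (h : i < l.length) : l.getD i 0 ∈ l := by
  rw [List.getD_eq_getElem _ _ h]; exact List.getElem_mem h

lemma matchD_iff (d e : List Int) (k : Nat) :
    matchD d e k = true ↔
      k ≤ d.length ∧ k ≤ e.length ∧ ∀ i < k, e.getD (e.length - k + i) 0 < d.getD i 0 := by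
  simp [matchD, List.all_eq_true, List.mem_range, and_assoc]

lemma matchA_iff (X Y : List Int) (k : Nat) :
    matchA X Y k = true ↔
      k ≤ X.length ∧ k ≤ Y.length ∧ ∀ i < k, Y.getD i 0 < X.getD (X.length - k + i) 0 := by
  simp [matchA, List.all_eq_true, List.mem_range, and_assoc]

lemma fg_congr {P Q : Nat → Prop} [DecidablePred P] [DecidablePred Q] :
    ∀ n, (∀ k, k ≤ n → (P k ↔ Q k)) → Nat.findGreatest P n = Nat.findGreatest Q n := by
  intro n
  induction n with
  | zero => intro _; rfl
  | succ n ih =>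
      intro h
      rw [Nat.findGreatest_succ, Nat.findGreatest_succ]
      by_cases hp : P (n + 1)
      · rw [if_pos hp, if_pos ((h (n + 1) le_rfl).mp hp)]
      · rw [if_neg hp, if_neg (fun hq => hp ((h (n + 1) le_rfl).mpr hq)),
          ih (fun k hk => h k (by omega))]

lemma fg_shift {P' P : Nat → Prop} [DecidablePred P'] [DecidablePred P]
    (hP0 : P 0) (hiff : ∀ k, P' (k + 1) ↔ P k) :
    ∀ m, Nat.findGreatest P' (m + 1) = Nat.findGreatest P m + 1 := by
  intro m
  induction m with
  | zero => rw [Nat.findGreatest_succ, if_pos ((hiff 0).mpr hP0)]; rfl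
  | succ m ih =>
      rw [Nat.findGreatest_succ]
      conv_rhs => rw [Nat.findGreatest_succ]
      by_cases hp : P (m + 1)
      · rw [if_pos ((hiff (m + 1)).mpr hp), if_pos hp]
      · rw [if_neg (fun hq => hp ((hiff (m + 1)).mp hq)), if_neg hp, ih]

lemma fg_zero {P : Nat → Prop} [DecidablePred P] (h : ∀ k, 0 < k → ¬ P k) :
    ∀ n, Nat.findGreatest P n = 0 := by
  intro n
  induction n with
  | zero => rfl
  | succ n ih => rw [Nat.findGreatest_succ, if_neg (h (n + 1) (by omega)), ih]

lemma matchD_zero (d e : List Int) : matchD d e 0 = true := by simp [matchD]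
lemma matchA_zero (X Y : List Int) : matchA X Y 0 = true := by simp [matchA]

lemma bestD_nil_left (e : List Int) : bestD [] e = 0 := rfl

lemma bestD_nil_right (d : List Int) : bestD d [] = 0 := by
  refine fg_zero (fun k hk hP => ?_) _
  rw [matchD_iff] at hP
  simp at hP; omega

lemma bestD_skip (d E : List Int) (y : Int) (h : d.getD 0 0 ≤ y) :
    bestD d (y :: E) = bestD d E := by
  refine fg_congr _ (fun k hk => ?_)
  rw [matchD_iff, matchD_iff]
  by_cases hkE : k ≤ E.length
  · constructor
    · rintro ⟨h1, _, h3⟩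
      refine ⟨h1, hkE, fun i hi => ?_⟩
      have := h3 i hi
      rwa [show (y :: E).length - k + i = (E.length - k + i) + 1 by simp; omega,
        List.getD_cons_succ] at this
    · rintro ⟨h1, _, h3⟩
      refine ⟨h1, by simp; omega, fun i hi => ?_⟩
      rw [show (y :: E).length - k + i = (E.length - k + i) + 1 by simp; omega,
        List.getD_cons_succ]
      exact h3 i hi
  · constructor
    · rintro ⟨h1, h2, h3⟩
      simp at h2
      have hkeq : k = E.length + 1 := by omega
      have := h3 0 (by omega)
      rw [show (y :: E).length - k + 0 = 0 by simp; omega, List.getD_cons_zero] at this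
      omega
    · rintro ⟨_, h2, _⟩; omega

lemma bestD_match (x y : Int) (D E : List Int) (hxy : y < x)
    (hE : ∀ b ∈ E, b ≤ y) :
    bestD (x :: D) (y :: E) = bestD D E + 1 := by
  show Nat.findGreatest _ (D.length + 1) = Nat.findGreatest _ D.length + 1
  refine fg_shift (matchD_zero D E) (fun k => ?_) _
  rw [matchD_iff, matchD_iff]
  constructor
  · rintro ⟨h1, h2, h3⟩
    simp at h1 h2
    refine ⟨by omega, by omega, fun j hj => ?_⟩
    have := h3 (j + 1) (by omega)
    rwa [show (y :: E).length - (k + 1) + (j + 1) = (E.length - k + j) + 1 by simp; omega,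
      List.getD_cons_succ, List.getD_cons_succ] at this
  · rintro ⟨h1, h2, h3⟩
    refine ⟨by simp; omega, by simp; omega, fun i hi => ?_⟩
    match i with
    | 0 =>
        rw [show (y :: E).length - (k + 1) + 0 = E.length - k by simp only [List.length_cons]; omega]
        simp only [List.getD_cons_zero]
        by_cases hkE : k = E.length
        · rw [hkE]; simpa using hxy
        · rw [show E.length - k = (E.length - k - 1) + 1 by omega, List.getD_cons_succ]
          have hm : E.getD (E.length - k - 1) 0 ∈ E := gd_mem _ _ (by omega)
          have := hE _ hm
          omega
    | j + 1 =>
        rw [show (y :: E).length - (k + 1) + (j + 1) = (E.length - k + j) + 1 by simp; omega,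
          List.getD_cons_succ, List.getD_cons_succ]
        exact h3 j (by omega)

lemma bestA_nil_right (X : List Int) : bestA X [] = 0 := by
  refine fg_zero (fun k hk hP => ?_) _
  rw [matchA_iff] at hP
  simp at hP; omega

lemma bestA_skip (x y : Int) (X Y : List Int) (hxy : ¬ x > y) :
    bestA (x :: X) (y :: Y) = bestA X (y :: Y) := by
  show Nat.findGreatest _ (X.length + 1) = Nat.findGreatest _ X.length
  rw [Nat.findGreatest_succ, if_neg]
  · refine fg_congr _ (fun k hk => ?_)
    rw [matchA_iff, matchA_iff]
    constructor
    · rintro ⟨_, h2, h3⟩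
      refine ⟨hk, h2, fun i hi => ?_⟩
      have := h3 i hi
      rwa [show (x :: X).length - k + i = (X.length - k + i) + 1 by simp; omega,
        List.getD_cons_succ] at this
    · rintro ⟨_, h2, h3⟩
      refine ⟨by simp; omega, h2, fun i hi => ?_⟩
      rw [show (x :: X).length - k + i = (X.length - k + i) + 1 by simp; omega,
        List.getD_cons_succ]
      exact h3 i hi
  · intro hP
    rw [matchA_iff] at hP
    obtain ⟨_, _, h3⟩ := hP
    have := h3 0 (by omega)
    rw [show (x :: X).length - (X.length + 1) + 0 = 0 by simp] at this
    simp at this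
    omega

lemma bestA_match (x y : Int) (X Y : List Int) (hxy : y < x) (hX : ∀ a ∈ X, x ≤ a) :
    bestA (x :: X) (y :: Y) = bestA X Y + 1 := by
  show Nat.findGreatest _ (X.length + 1) = Nat.findGreatest _ X.length + 1
  refine fg_shift (matchA_zero X Y) (fun k => ?_) _
  rw [matchA_iff, matchA_iff]
  constructor
  · rintro ⟨h1, h2, h3⟩
    simp at h1 h2
    refine ⟨by omega, by omega, fun j hj => ?_⟩
    have := h3 (j + 1) (by omega)
    rwa [show (x :: X).length - (k + 1) + (j + 1) = (X.length - k + j) + 1 by simp; omega,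
      List.getD_cons_succ, List.getD_cons_succ] at this
  · rintro ⟨h1, h2, h3⟩
    refine ⟨by simp; omega, by simp; omega, fun i hi => ?_⟩
    match i with
    | 0 =>
        rw [show (x :: X).length - (k + 1) + 0 = X.length - k by simp only [List.length_cons]; omega]
        simp only [List.getD_cons_zero]
        by_cases hkX : k = X.length
        · rw [hkX]; simpa using hxy
        · rw [show X.length - k = (X.length - k - 1) + 1 by omega, List.getD_cons_succ]
          have hm : X.getD (X.length - k - 1) 0 ∈ X := gd_mem _ _ (by omega)
          have := hX _ hm
          omega
    | j + 1 =>
        rw [show (x :: X).length - (k + 1) + (j + 1) = (X.length - k + j) + 1 by simp; omega,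
          List.getD_cons_succ, List.getD_cons_succ]
        exact h3 j (by omega)

lemma matchA_rev (d e : List Int) (k : Nat) :
    (matchA d.reverse e.reverse k = true) ↔ (matchD d e k = true) := by
  rw [matchA_iff, matchD_iff]
  simp only [List.length_reverse]
  constructor
  · rintro ⟨h1, h2, h3⟩
    refine ⟨h1, h2, fun i hi => ?_⟩
    have := h3 (k - 1 - i) (by omega)
    rwa [gd_rev _ _ (by omega), gd_rev _ _ (by omega),
      show e.length - 1 - (k - 1 - i) = e.length - k + i by omega,
      show d.length - 1 - (d.length - k + (k - 1 - i)) = i by omega] at this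
  · rintro ⟨h1, h2, h3⟩
    refine ⟨h1, h2, fun i hi => ?_⟩
    rw [gd_rev _ _ (by omega), gd_rev _ _ (by omega),
      show e.length - 1 - i = e.length - k + (k - 1 - i) by omega,
      show d.length - 1 - (d.length - k + i) = k - 1 - i by omega]
    exact h3 (k - 1 - i) (by omega)

lemma bestA_rev (d e : List Int) : bestA d.reverse e.reverse = bestD d e := by
  show Nat.findGreatest _ d.reverse.length = Nat.findGreatest _ d.length
  rw [List.length_reverse]
  exact fg_congr _ (fun k _ => matchA_rev d e k)

lemma gB_nil_right : ∀ (X : List Int), gB X [] = 0 := by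
  intro X; cases X <;> rfl

lemma gB_bestA : ∀ (X Y : List Int), X.Pairwise (· ≤ ·) → gB X Y = (bestA X Y : Int) := by
  intro X
  induction X with
  | nil => intro Y _; rfl
  | cons x X ih =>
      intro Y hp
      rw [List.pairwise_cons] at hp
      cases Y with
      | nil => rw [gB_nil_right, bestA_nil_right]; rfl
      | cons y Y =>
          by_cases hxy : x > y
          · simp only [gB, if_pos hxy]
            rw [bestA_match x y X Y hxy hp.1, ih Y hp.2]
            push_cast; ring
          · simp only [gB, if_neg hxy]
            rw [bestA_skip x y X Y hxy, ih (y :: Y) hp.2]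

lemma foldl_gB (ys : List Int) :
    ∀ (xs : List Int) (k : Nat), k ≤ ys.length →
      xs.foldl (fun ans x =>
          if ans < (ys.length : Int) ∧ x > PySem.List.pyGetD ys ans 0 then ans + 1 else ans)
        (k : Int) = (k : Int) + gB xs (ys.drop k) := by
  intro xs
  induction xs with
  | nil => intro k hk; simp [gB]
  | cons x xs ih =>
      intro k hk
      simp only [List.foldl_cons]
      by_cases hklt : k < ys.length
      · rw [List.drop_eq_getElem_cons hklt]
        have hget : PySem.List.pyGetD ys (k : Int) 0 = ys[k] := by
          rw [PySem.List.pyGetD_natCast, List.getD_eq_getElem _ _ hklt]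
        by_cases hcomp : x > ys[k]
        · rw [if_pos ⟨by exact_mod_cast hklt, by rw [hget]; exact hcomp⟩]
          have : (k : Int) + 1 = ((k + 1 : Nat) : Int) := by push_cast; ring
          rw [this, ih (k + 1) hklt]
          simp only [gB, if_pos hcomp]
          push_cast; ring
        · rw [if_neg (by rw [hget]; tauto), ih k hk]
          simp only [gB, if_neg hcomp]
          rw [← List.drop_eq_getElem_cons hklt]
      · have hkeq : k = ys.length := by omega
        rw [if_neg (by rw [hkeq]; simp), ih k hk]
        rw [hkeq, List.drop_length, gB_nil_right, gB_nil_right]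

lemma skipA_bestD (aS bS : List Int) (n i : Nat) (hn : n = aS.length) (hb : n ≤ bS.length) :
    ∀ j, j ≤ n →
      j ≤ skipA aS bS n i j ∧ skipA aS bS n i j ≤ n ∧
      bestD (aS.drop i) ((bS.take n).drop j)
        = bestD (aS.drop i) ((bS.take n).drop (skipA aS bS n i j)) ∧
      (skipA aS bS n i j < n → bS.getD (skipA aS bS n i j) 0 < aS.getD i 0) := by
  have hbT : (bS.take n).length = n := by simp; omega
  suffices H : ∀ fuel j, j ≤ n → n - j ≤ fuel →
      j ≤ skipA aS bS n i j ∧ skipA aS bS n i j ≤ n ∧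
      bestD (aS.drop i) ((bS.take n).drop j)
        = bestD (aS.drop i) ((bS.take n).drop (skipA aS bS n i j)) ∧
      (skipA aS bS n i j < n → bS.getD (skipA aS bS n i j) 0 < aS.getD i 0) by
    exact fun j hj => H (n - j) j hj le_rfl
  intro fuel
  induction fuel with
  | zero =>
      intro j hj hf
      have hjn : j = n := by omega
      rw [skipA, dif_neg (by omega)]
      exact ⟨le_rfl, hj, rfl, by omega⟩
  | succ fuel ihf =>
      intro j hj hf
      rw [skipA]
      by_cases hc : j < n ∧ bS.getD j 0 ≥ aS.getD i 0
      · rw [dif_pos hc]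
        obtain ⟨h1, h2, h3, h4⟩ := ihf (j + 1) (by omega) (by omega)
        refine ⟨by omega, h2, ?_, h4⟩
        rw [← h3]
        have hjT : j < (bS.take n).length := by omega
        rw [List.drop_eq_getElem_cons hjT]
        refine bestD_skip _ _ _ ?_
        rw [gd_drop, Nat.add_zero]
        have : (bS.take n)[j] = bS[j]'(by omega) := List.getElem_take
        rw [this, ← List.getD_eq_getElem _ 0 (by omega)]
        exact hc.2
      · rw [dif_neg hc]
        exact ⟨le_rfl, hj, rfl, fun hlt => by
          by_contra hno
          exact hc ⟨hlt, by omega⟩⟩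

lemma loopA_bestD (aS bS : List Int) (n : Nat) (hn : n = aS.length) (hb : n ≤ bS.length)
    (hbs : bS.Pairwise (fun p q => q ≤ p)) :
    ∀ i j (ans : Int), i ≤ n → j ≤ n →
      loopA aS bS n i j ans = ans + bestD (aS.drop i) ((bS.take n).drop j) := by
  have hbT : (bS.take n).length = n := by simp; omega
  have hbTp : (bS.take n).Pairwise (fun p q => q ≤ p) := hbs.sublist (List.take_sublist n bS)
  suffices H : ∀ fuel i j (ans : Int), i ≤ n → j ≤ n → n - i ≤ fuel →
      loopA aS bS n i j ans = ans + bestD (aS.drop i) ((bS.take n).drop j) by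
    exact fun i j ans hi hj => H (n - i) i j ans hi hj le_rfl
  intro fuel
  induction fuel with
  | zero =>
      intro i j ans hi hj hf
      have hin : i = n := by omega
      rw [loopA, dif_neg (by omega)]
      rw [hin, hn, List.drop_length, bestD_nil_left]
      simp
  | succ fuel ihf =>
      intro i j ans hi hj hf
      rw [loopA]
      by_cases hc : i < n ∧ j < n
      · rw [dif_pos hc]
        obtain ⟨hjj', hj'n, heq, hlt⟩ := skipA_bestD aS bS n i hn hb j hj
        by_cases hjn : skipA aS bS n i j = n
        · rw [if_pos hjn]
          rw [heq, hjn, show List.drop n (List.take n bS) = [] from List.drop_eq_nil_of_le (by omega), bestD_nil_right]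
          simp
        · rw [if_neg hjn]
          have hj'ltn : skipA aS bS n i j < n := by omega
          rw [ihf (i + 1) (skipA aS bS n i j + 1) (ans + 1) (by omega) (by omega) (by omega)]
          rw [heq]
          have hiA : i < aS.length := by omega
          have hj'T : skipA aS bS n i j < (bS.take n).length := by omega
          rw [List.drop_eq_getElem_cons hiA, List.drop_eq_getElem_cons hj'T]
          have hyx : (bS.take n)[skipA aS bS n i j] < aS[i] := by
            have h1 : (bS.take n)[skipA aS bS n i j] = bS[skipA aS bS n i j]'(by omega) :=
              List.getElem_take
            have h2 := hlt hj'ltn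
            rw [List.getD_eq_getElem _ 0 (by omega), List.getD_eq_getElem _ 0 hiA] at h2
            rw [h1]; exact h2
          have hE : ∀ v ∈ (bS.take n).drop (skipA aS bS n i j + 1),
              v ≤ (bS.take n)[skipA aS bS n i j] := by
            have hp : ((bS.take n).drop (skipA aS bS n i j)).Pairwise (fun p q => q ≤ p) :=
              hbTp.drop
            rw [List.drop_eq_getElem_cons hj'T, List.pairwise_cons] at hp
            exact hp.1
          rw [bestD_match _ _ _ _ hyx hE]
          push_cast; ring
      · rw [dif_neg hc]
        rcases (by omega : i = n ∨ j = n) with hin | hjn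
        · rw [hin, hn, List.drop_length, bestD_nil_left]; simp
        · rw [hjn, show List.drop n (List.take n bS) = [] from List.drop_eq_nil_of_le (by omega), bestD_nil_right]; simp

lemma bridge (aS bS : List Int) (n : Nat) (hn : n = aS.length) (hb : n ≤ bS.length)
    (ha : aS.Pairwise (fun p q => q ≤ p)) (hbs : bS.Pairwise (fun p q => q ≤ p)) :
    loopA aS bS n 0 0 0 =
      aS.reverse.foldl
        (fun ans x => if ans < (((bS.take n).reverse).length : Int) ∧
            x > PySem.List.pyGetD ((bS.take n).reverse) ans 0 then ans + 1 else ans) 0 := by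
  rw [loopA_bestD aS bS n hn hb hbs 0 0 0 (by omega) (by omega), List.drop_zero,
    List.drop_zero]
  have hasc : aS.reverse.Pairwise (· ≤ ·) := List.pairwise_reverse.mpr ha
  have h1 := foldl_gB ((bS.take n).reverse) aS.reverse 0 (by omega)
  simp only [Nat.cast_zero, List.drop_zero] at h1
  rw [h1, gB_bestA _ _ hasc, bestA_rev]

-- ===== VERDICT (by name: the statement is the Claim_ definition above) =====
theorem solve_spec : Claim_equal_solve := by
  intro a b _ hpre
  show solve a b = solve_alt a b
  simp only [solve, solve_alt, PySem.List.slice_to_natCast]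
  exact bridge _ _ _ (PySem.List.length_sorted _ _ _).symm
    (by rw [PySem.List.length_sorted _ _ _]; exact hpre)
    (PySem.List.sorted_pairwise_rev a (fun x => x)) (PySem.List.sorted_pairwise_rev b (fun x => x))
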